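-- pv_equiv track=rewrite | github.com/sophieehaight/AnnealingStudies | plotting_helper.py | strip_sort
-- ===== SOURCE A (Python) =====
-- def strip_sort(energies, stripID):
--     from collections import defaultdict
--     mapping = defaultdict(list)
--     # Populate the mapping
--     for strip, e in zip(stripID, energies):
--         mapping[strip].append(e)
--
--     # Ensure all numbers 1-37 are included in the final result, even if they have no corresponding values
--     all_strips = list(range(1, 38))
--     grouped_energies = [mapping[strip] for strip in all_strips]
--
--     return grouped_energies
-- ===== SOURCE B (Python) =====
-- def strip_sort(energies, stripID):
--     pairs = list(zip(stripID, energies))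
--     return [[e for s, e in pairs if s == strip] for strip in range(1, 38)]
-- ===== Notes on version B (the rewrite author's own statement) =====
-- stated objective: simpler
-- what changed: B drops the defaultdict index-building pass and instead directly builds each of the 37 groups by filtering the zipped (stripID, energy) pairs per strip id.
import Mathlib
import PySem

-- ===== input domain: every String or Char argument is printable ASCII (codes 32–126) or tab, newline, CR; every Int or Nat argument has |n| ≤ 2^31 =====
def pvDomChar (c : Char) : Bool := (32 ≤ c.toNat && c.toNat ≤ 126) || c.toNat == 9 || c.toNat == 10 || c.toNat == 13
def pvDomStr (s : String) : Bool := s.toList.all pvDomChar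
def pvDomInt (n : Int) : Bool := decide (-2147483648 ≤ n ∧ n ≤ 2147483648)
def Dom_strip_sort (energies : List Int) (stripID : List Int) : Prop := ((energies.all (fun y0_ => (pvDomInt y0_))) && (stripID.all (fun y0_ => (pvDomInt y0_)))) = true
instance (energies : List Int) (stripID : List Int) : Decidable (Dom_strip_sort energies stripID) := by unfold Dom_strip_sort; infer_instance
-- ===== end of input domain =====

-- B replaces A's defaultdict index-building pass by a direct per-strip filter of the zipped pairs (simpler; same return value).

-- ===== PORT A =====
-- for strip, e in zip(stripID, energies): mapping[strip].append(e)  -- defaultdict(list)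
-- then [mapping[strip] for strip in range(1, 38)]  (a missing key reads as [])
def strip_sort (energies : List Int) (stripID : List Int) : List (List Int) :=
  let mapping : PySem.Dict Int (List Int) :=
    (stripID.zip energies).foldl
      (fun d p => d.insert p.1 (d.getD p.1 [] ++ [p.2])) PySem.Dict.empty
  (PySem.List.pyRange 1 38 1).map (fun strip => mapping.getD strip [])

-- ===== PORT B =====
def strip_sort_alt (energies : List Int) (stripID : List Int) : List (List Int) :=
  let pairs := stripID.zip energies
  (PySem.List.pyRange 1 38 1).map (fun strip =>
    (pairs.filter (fun p => p.1 == strip)).map (fun p => p.2))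

-- ===== PRECONDITION & SPEC =====
def Spec_strip_sort (energies : List Int) (stripID : List Int) (out : List (List Int)) : Prop := out = strip_sort_alt energies stripID
instance (energies : List Int) (stripID : List Int) (out : List (List Int)) : Decidable (Spec_strip_sort energies stripID out) := by unfold Spec_strip_sort; infer_instance

-- ===== CLAIM (what is proved, stated in full; the proofs are below) =====
def Claim_equal_strip_sort : Prop := ∀ (energies : List Int) (stripID : List Int), Dom_strip_sort energies stripID → Spec_strip_sort energies stripID (strip_sort energies stripID)

-- ===== LEMMAS AND PROOFS =====

-- the grouping fold read back at key s is exactly the filtered-then-projected pairs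
theorem strip_sort_fold_getD (l : List (Int × Int)) (d : PySem.Dict Int (List Int)) (s : Int) :
    (l.foldl (fun d p => d.insert p.1 (d.getD p.1 [] ++ [p.2])) d).getD s []
      = d.getD s [] ++ (l.filter (fun p => p.1 == s)).map (fun p => p.2) := by
  induction l generalizing d with
  | nil => simp
  | cons p t ih =>
    simp only [List.foldl_cons, List.filter_cons]
    rw [ih]
    by_cases h : p.1 = s
    · subst h
      simp [PySem.Dict.getD_insert_self]
    · rw [PySem.Dict.getD_insert_of_ne]
      · simp [h]
      · exact fun hc => h hc.symm

-- ===== VERDICT (by name: the statement is the Claim_ definition above) =====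
theorem strip_sort_spec : Claim_equal_strip_sort := by
  intro energies stripID _
  unfold Spec_strip_sort strip_sort strip_sort_alt
  refine List.map_congr_left (fun s _ => ?_)
  rw [strip_sort_fold_getD]
  simp
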